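-- pv_equiv track=rewrite | github.com/LucasConde22/TPs-TDA | Guías/1P/10-02-25/1.py | prefijo_balanceado_mas_largo
-- ===== SOURCE A (Python) =====
-- def prefijo_balanceado_mas_largo(cadena):
--     mas_largo, balance = 0, 0
--
--     for i in range(len(cadena)):
--         if cadena[i] == '(':
--             balance += 1
--         else:
--             balance -= 1
--
--         if balance < 0:
--             break
--
--         if balance == 0:
--             mas_largo = i + 1
--
--     return mas_largo
-- ===== SOURCE B (Python) =====
-- def prefijo_balanceado_mas_largo(cadena):
--     # Phase 1: table of running balances.
--     balances = []
--     b = 0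
--     for c in cadena:
--         b += 1 if c == '(' else -1
--         balances.append(b)
--     # Phase 2: index of the first negative balance (or full length).
--     f = len(balances)
--     for i, v in enumerate(balances):
--         if v < 0:
--             f = i
--             break
--     # Phase 3: last zero balance before f.
--     mejor = 0
--     for i in range(f):
--         if balances[i] == 0:
--             mejor = i + 1
--     return mejor
-- ===== Notes on version B (the rewrite author's own statement) =====
-- stated objective: alternative
-- what changed: A's single inline loop with break is replaced by a three-phase decomposition: build the running-balance prefix table, locate the first negative balance, then scan that prefix for the last zero balance.
import Mathlib
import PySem

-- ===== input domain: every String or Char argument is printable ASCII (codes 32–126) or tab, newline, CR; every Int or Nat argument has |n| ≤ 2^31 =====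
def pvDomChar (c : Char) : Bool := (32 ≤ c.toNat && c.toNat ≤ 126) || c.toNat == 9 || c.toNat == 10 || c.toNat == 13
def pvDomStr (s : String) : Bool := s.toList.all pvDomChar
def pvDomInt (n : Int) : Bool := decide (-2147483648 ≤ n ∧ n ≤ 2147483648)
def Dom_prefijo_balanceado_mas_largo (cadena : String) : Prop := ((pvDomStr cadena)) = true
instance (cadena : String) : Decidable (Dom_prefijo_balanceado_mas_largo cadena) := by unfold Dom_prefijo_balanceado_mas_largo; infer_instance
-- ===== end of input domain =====

-- B replaces A's single break-on-negative loop by a prefix-balance table plus two separately-shaped searches (alternative decomposition, same cost).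

-- ===== PORT A =====
-- A's for-loop with break: update balance, break if negative, record i+1 on zero.
def pvA_loop : List Char → Int → Int → Int → Int
  | [], _, mas_largo, _ => mas_largo
  | c :: rest, i, mas_largo, balance =>
    let balance' := if c = '(' then balance + 1 else balance - 1
    if balance' < 0 then mas_largo
    else if balance' = 0 then pvA_loop rest (i + 1) (i + 1) balance'
    else pvA_loop rest (i + 1) mas_largo balance'

def prefijo_balanceado_mas_largo (cadena : String) : Int :=
  pvA_loop cadena.toList 0 0 0

-- ===== PORT B =====
-- Phase 1 of Source B: list of running balances.
def pvB_bal : List Char → Int → List Int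
  | [], _ => []
  | c :: rest, b =>
    let b' := b + (if c = '(' then 1 else -1)
    b' :: pvB_bal rest b'

-- Phase 2 of Source B: index of first negative balance, or length if none (enumerate + break).
def pvB_firstNeg : List Int → Nat
  | [] => 0
  | v :: rest => if v < 0 then 0 else 1 + pvB_firstNeg rest

def prefijo_balanceado_mas_largo_alt (cadena : String) : Int :=
  let balances := pvB_bal cadena.toList 0
  let f := pvB_firstNeg balances
  -- Phase 3 of Source B: for i in range(f): if balances[i] == 0: mejor = i + 1
  (List.range f).foldl (fun mejor i => if balances.getD i 0 = 0 then (i : Int) + 1 else mejor) 0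

-- ===== PRECONDITION & SPEC =====
def Spec_prefijo_balanceado_mas_largo (cadena : String) (out : Int) : Prop := out = prefijo_balanceado_mas_largo_alt cadena
instance (cadena : String) (out : Int) : Decidable (Spec_prefijo_balanceado_mas_largo cadena out) := by unfold Spec_prefijo_balanceado_mas_largo; infer_instance

-- ===== CLAIM (what is proved, stated in full; the proofs are below) =====
def Claim_equal_prefijo_balanceado_mas_largo : Prop := ∀ (cadena : String), Dom_prefijo_balanceado_mas_largo cadena → Spec_prefijo_balanceado_mas_largo cadena (prefijo_balanceado_mas_largo cadena)

-- ===== LEMMAS AND PROOFS =====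
theorem pvA_eq_B_phases (l : List Char) (b i mas : Int) :
    pvA_loop l i mas b =
      (List.range (pvB_firstNeg (pvB_bal l b))).foldl
        (fun mejor j => if (pvB_bal l b).getD j 0 = 0 then i + (j : Int) + 1 else mejor) mas := by
  induction l generalizing b i mas with
  | nil => simp [pvA_loop, pvB_bal, pvB_firstNeg]
  | cons c rest ih =>
    simp only [pvA_loop, pvB_bal]
    have hδ : b + (if c = '(' then 1 else -1) = if c = '(' then b + 1 else b - 1 := by
      split <;> ring
    simp only [hδ]
    set b' := if c = '(' then b + 1 else b - 1 with hb'
    by_cases hneg : b' < 0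
    · simp [pvB_firstNeg, hneg]
    · simp only [pvB_firstNeg, if_neg hneg]
      have hrange : List.range (1 + pvB_firstNeg (pvB_bal rest b')) =
          0 :: (List.range (pvB_firstNeg (pvB_bal rest b'))).map Nat.succ := by
        rw [Nat.add_comm, List.range_succ_eq_map]
      rw [hrange]
      simp only [List.foldl_cons, List.foldl_map, List.getD_cons_zero, List.getD_cons_succ]
      by_cases hz : b' = 0
      · simp only [if_pos hz, Nat.cast_zero, add_zero]
        rw [ih b' (i + 1) (i + 1)]
        apply PySem.List.foldl_congr_mem
        intro mejor j _
        have : i + ((j : Int) + 1) + 1 = i + 1 + (j : Int) + 1 := by ring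
        simp [Nat.succ_eq_add_one, this]
      · simp only [if_neg hz]
        rw [ih b' (i + 1) mas]
        apply PySem.List.foldl_congr_mem
        intro mejor j _
        have : i + ((j : Int) + 1) + 1 = i + 1 + (j : Int) + 1 := by ring
        simp [Nat.succ_eq_add_one, this]

-- ===== VERDICT (by name: the statement is the Claim_ definition above) =====
theorem prefijo_balanceado_mas_largo_spec : Claim_equal_prefijo_balanceado_mas_largo := by
  intro cadena _
  unfold Spec_prefijo_balanceado_mas_largo prefijo_balanceado_mas_largo prefijo_balanceado_mas_largo_alt
  rw [pvA_eq_B_phases]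
  simp only [zero_add]
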